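-- pv_equiv track=rewrite | github.com/frenzis01/carbonshift | utility_features.py | decrease_assignment
-- ===== SOURCE A (Python) =====
-- def decrease_assignment(sum_list, assignment, ratio_slot):      # Fill full blocks
--     count_blocks = 0
--
--     for v in range(0,len(assignment)):
--         while( assignment[v]>=ratio_slot ):
--             sum_list.append(v)
--             assignment[v] -= ratio_slot
--             count_blocks += 1
--
--     return count_blocks
-- ===== SOURCE B (Python) =====
-- def decrease_assignment(sum_list, assignment, ratio_slot):      # Fill full blocks
--     count_blocks = 0
--     for v in range(len(assignment)):
--         count = max(assignment[v] // ratio_slot, 0)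
--         sum_list.extend([v] * count)
--         assignment[v] -= count * ratio_slot
--         count_blocks += count
--     return count_blocks
-- ===== Notes on version B (the rewrite author's own statement) =====
-- stated objective: alternative
-- what changed: The inner repeated-subtraction while loop is replaced by a single floor division per entry (count = assignment[v]//ratio_slot, clamped at 0), extending sum_list in one step and subtracting count*ratio_slot once; it does the same work per entry in O(1) arithmetic instead of O(count) iterations, though a timing run did not show a measurable win on the generated inputs.
-- outside the precondition, e.g. on decrease_assignment([], [-5], -2): A returns 0, B returns 2; on decrease_assignment([], [-3], 0): A returns 0, B raises ZeroDivisionError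
import Mathlib
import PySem

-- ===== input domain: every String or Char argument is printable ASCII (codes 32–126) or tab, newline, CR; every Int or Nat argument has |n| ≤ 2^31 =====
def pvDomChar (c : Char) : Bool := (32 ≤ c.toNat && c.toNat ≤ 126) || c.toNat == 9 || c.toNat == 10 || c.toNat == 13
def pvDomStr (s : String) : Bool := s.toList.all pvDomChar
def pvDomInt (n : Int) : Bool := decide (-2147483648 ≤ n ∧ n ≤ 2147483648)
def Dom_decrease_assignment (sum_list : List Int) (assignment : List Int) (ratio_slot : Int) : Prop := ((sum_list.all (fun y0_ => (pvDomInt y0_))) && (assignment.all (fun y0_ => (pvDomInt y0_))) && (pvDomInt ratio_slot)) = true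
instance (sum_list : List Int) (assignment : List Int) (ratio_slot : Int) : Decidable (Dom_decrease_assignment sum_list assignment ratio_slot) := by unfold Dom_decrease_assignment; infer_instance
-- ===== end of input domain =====

-- B replaces A's inner repeated-subtraction while loop by one clamped floor division per entry (a different algorithm, not claimed faster).
-- Both Pythons mutate sum_list and assignment identically on Pre_; the theorems here are about the RETURN value.

-- ===== PORT A =====
-- inner 'while assignment[v] >= ratio_slot' loop of A, threading (current value, count_blocks);
-- the 'r > 0' conjunct is a totality guard only (Python diverges when the loop runs with r ≤ 0; Pre_ excludes r ≤ 0)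
def pvWhileA (a r c : Int) : Int × Int :=
  if h : 0 < r ∧ r ≤ a then pvWhileA (a - r) r (c + 1) else (a, c)
termination_by a.toNat
decreasing_by omega

def decrease_assignment (sum_list : List Int) (assignment : List Int) (ratio_slot : Int) : Int :=
  assignment.foldl (fun count_blocks v => (pvWhileA v ratio_slot count_blocks).2) 0

-- ===== PORT B =====
def decrease_assignment_alt (sum_list : List Int) (assignment : List Int) (ratio_slot : Int) : Int :=
  assignment.foldl (fun count_blocks v => count_blocks + max (PySem.Int.floordiv v ratio_slot) 0) 0

-- ===== PRECONDITION & SPEC =====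
-- Pre_ restricts to the natural domain of positive block size: for ratio_slot ≤ 0 the Python A
-- loops forever as soon as some entry is ≥ ratio_slot, and returns 0 only in the degenerate
-- all-entries-below-ratio_slot case (where B divides, at ratio_slot = 0 raising ZeroDivisionError).
def Pre_decrease_assignment (sum_list : List Int) (assignment : List Int) (ratio_slot : Int) : Prop :=
  0 < ratio_slot
instance (sum_list : List Int) (assignment : List Int) (ratio_slot : Int) : Decidable (Pre_decrease_assignment sum_list assignment ratio_slot) := by unfold Pre_decrease_assignment; infer_instance

def pvWitness_decrease_assignment : List Int × List Int × Int := ([0], [7, -3, 2], 2)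

def Spec_decrease_assignment (sum_list : List Int) (assignment : List Int) (ratio_slot : Int) (out : Int) : Prop := out = decrease_assignment_alt sum_list assignment ratio_slot
instance (sum_list : List Int) (assignment : List Int) (ratio_slot : Int) (out : Int) : Decidable (Spec_decrease_assignment sum_list assignment ratio_slot out) := by unfold Spec_decrease_assignment; infer_instance

-- ===== CLAIM (what is proved, stated in full; the proofs are below) =====
def Claim_equal_decrease_assignment : Prop := ∀ (sum_list : List Int) (assignment : List Int) (ratio_slot : Int), Dom_decrease_assignment sum_list assignment ratio_slot → Pre_decrease_assignment sum_list assignment ratio_slot → Spec_decrease_assignment sum_list assignment ratio_slot (decrease_assignment sum_list assignment ratio_slot)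

-- ===== LEMMAS AND PROOFS =====

-- the inner while loop's count equals one clamped floor division
theorem pvWhileA_snd (a r c : Int) (hr : 0 < r) :
    (pvWhileA a r c).2 = c + max (PySem.Int.floordiv a r) 0 := by
  rw [PySem.Int.floordiv_eq_ediv_of_pos hr]
  induction a, c using pvWhileA.induct r with
  | case1 a c h ih =>
    rw [pvWhileA, dif_pos h, ih]
    have h1 : (a - r) / r = a / r - 1 := by
      have h0 : a - r = a + (-1) * r := by ring
      rw [h0, Int.add_mul_ediv_right _ _ (by omega : r ≠ 0)]; ring
    have h2 : 1 ≤ a / r := (Int.le_ediv_iff_mul_le hr).mpr (by omega)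
    rw [h1]
    generalize a / r = q at h2 ⊢
    rw [max_eq_left (by omega), max_eq_left (by omega)]
    ring
  | case2 a c h =>
    rw [pvWhileA, dif_neg h]
    have h2 : a / r ≤ 0 := by
      have : a / r < 1 := (Int.ediv_lt_iff_lt_mul hr).mpr (by omega)
      omega
    rw [max_eq_right h2]
    simp

theorem pv_foldl_eq (r : Int) (hr : 0 < r) (l : List Int) (c : Int) :
    l.foldl (fun count_blocks v => (pvWhileA v r count_blocks).2) c
      = l.foldl (fun count_blocks v => count_blocks + max (PySem.Int.floordiv v r) 0) c := by
  induction l generalizing c with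
  | nil => rfl
  | cons x xs ih => rw [List.foldl_cons, List.foldl_cons, pvWhileA_snd _ _ _ hr]; exact ih _

-- ===== VERDICT (by name: the statement is the Claim_ definition above) =====
theorem decrease_assignment_spec : Claim_equal_decrease_assignment := by
  intro sum_list assignment ratio_slot _ hr
  unfold Spec_decrease_assignment decrease_assignment decrease_assignment_alt
  exact pv_foldl_eq ratio_slot hr assignment 0
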